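-- pv_equiv track=rewrite | github.com/chenjiefly/Alfred | Alfred.alfredpreferences/workflows/user.workflow.20086E84-512A-4FB8-96EA-33D51EE5DD9D/aliProductivity/eagleeye/eagleeye.py | search
-- ===== SOURCE A (Python) =====
-- def search(searchStr , list):
--     if len(searchStr) <= 0 :
--         return list
--
--     startMatchs = []
--     contains = []
--     for item in list:
--         if item['id'].startswith(searchStr):
--             startMatchs.append(item)
--         elif searchStr in item['id']:
--             contains.append(item)
--
--     return startMatchs + contains
-- ===== SOURCE B (Python) =====
-- def search(searchStr, list):
--     if len(searchStr) <= 0: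
--         return list
--     filtered = [item for item in list if searchStr in item['id']]
--     return sorted(filtered, key=lambda item: 0 if item['id'].startswith(searchStr) else 1)
-- ===== Notes on version B (the rewrite author's own statement) =====
-- stated objective: idiomatic
-- what changed: Replaces the one-pass two-accumulator partition by a substring filter followed by a stable sort on a 0/1 prefix-match key; Python's stable sort keeps prefix matches first and preserves relative order, matching A exactly.
import Mathlib
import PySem

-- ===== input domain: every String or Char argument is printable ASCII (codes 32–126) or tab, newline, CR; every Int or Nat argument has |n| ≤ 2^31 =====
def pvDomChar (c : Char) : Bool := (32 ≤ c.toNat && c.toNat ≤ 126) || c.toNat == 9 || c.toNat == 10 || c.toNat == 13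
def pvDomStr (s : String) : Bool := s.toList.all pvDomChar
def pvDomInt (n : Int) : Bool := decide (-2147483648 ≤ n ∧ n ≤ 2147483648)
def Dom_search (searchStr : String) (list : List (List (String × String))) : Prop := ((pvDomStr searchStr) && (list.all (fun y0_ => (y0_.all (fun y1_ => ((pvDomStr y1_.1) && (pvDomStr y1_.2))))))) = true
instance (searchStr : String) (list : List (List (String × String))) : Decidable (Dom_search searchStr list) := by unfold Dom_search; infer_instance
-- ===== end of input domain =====

-- B replaces A's one-pass two-accumulator partition by a substring filter plus a stable
-- sort on a 0/1 prefix-match key (idiomatic; same return value, no side effects).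

-- item['id'] : first match in the association list (Python dict subscript; `.getD ""`
-- is only reached where Python raises KeyError, which Pre_search excludes)
def pyId (item : List (String × String)) : String :=
  (((item.find? (fun p => p.1 == "id")).map Prod.snd).getD "")

-- ===== PORT A =====
def search (searchStr : String) (list : List (List (String × String))) : List (List (String × String)) :=
  if PySem.Str.len searchStr ≤ 0 then list
  else
    let r := list.foldl
      (fun (acc : List (List (String × String)) × List (List (String × String))) item =>
        if PySem.Str.startswith (pyId item) searchStr then (acc.1 ++ [item], acc.2)
        else if PySem.Str.isIn searchStr (pyId item) then (acc.1, acc.2 ++ [item])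
        else acc)
      ([], [])
    r.1 ++ r.2

-- ===== PORT B =====
def search_alt (searchStr : String) (list : List (List (String × String))) : List (List (String × String)) :=
  if PySem.Str.len searchStr ≤ 0 then list
  else
    PySem.List.sorted
      (list.filter (fun item => PySem.Str.isIn searchStr (pyId item)))
      (fun item => if PySem.Str.startswith (pyId item) searchStr then (0 : Int) else 1)
      false

-- ===== PRECONDITION & SPEC =====
-- Pre_ excludes exactly the inputs where Python raises KeyError: a nonempty searchStr
-- together with some item lacking an 'id' key (with empty searchStr no item is inspected).
def Pre_search (searchStr : String) (list : List (List (String × String))) : Prop :=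
  PySem.Str.len searchStr = 0 ∨ (list.all (fun item => item.any (fun p => p.1 == "id"))) = true
instance (searchStr : String) (list : List (List (String × String))) : Decidable (Pre_search searchStr list) := by unfold Pre_search; infer_instance
def pvWitness_search : String × (List (List (String × String))) :=
  ("ab", [[("id", "zab")], [("id", "abz")], [("id", "q")]])

def Spec_search (searchStr : String) (list : List (List (String × String))) (out : List (List (String × String))) : Prop := out = search_alt searchStr list
instance (searchStr : String) (list : List (List (String × String))) (out : List (List (String × String))) : Decidable (Spec_search searchStr list out) := by unfold Spec_search; infer_instance

-- ===== CLAIM (what is proved, stated in full; the proofs are below) =====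
def Claim_equal_search : Prop := ∀ (searchStr : String) (list : List (List (String × String))), Dom_search searchStr list → Pre_search searchStr list → Spec_search searchStr list (search searchStr list)

-- ===== LEMMAS AND PROOFS =====

-- prefix match implies substring match
theorem sw_isIn (s id : List Char) (h : PySem.Chars.startswith id s = true) :
    PySem.Chars.isIn s id = true := by
  rw [PySem.Chars.isIn_iff_infix]
  have hp := PySem.Chars.startswith_iff (s := id) (p := s)
  exact (hp.mp h).isInfix

-- A's loop computes the two filters
theorem searchA_loop (s : String) (xs : List (List (String × String)))
    (acc : List (List (String × String)) × List (List (String × String))) :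
    xs.foldl
      (fun acc item =>
        if PySem.Str.startswith (pyId item) s then (acc.1 ++ [item], acc.2)
        else if PySem.Str.isIn s (pyId item) then (acc.1, acc.2 ++ [item])
        else acc)
      acc
    = (acc.1 ++ xs.filter (fun i => PySem.Str.startswith (pyId i) s),
       acc.2 ++ xs.filter (fun i => !PySem.Str.startswith (pyId i) s && PySem.Str.isIn s (pyId i))) := by
  induction xs generalizing acc with
  | nil => simp
  | cons y t ih =>
    simp only [PySem.Str.startswith_eq, PySem.Str.isIn_eq] at ih ⊢
    simp only [List.foldl_cons, List.filter_cons]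
    by_cases hsw : PySem.Chars.startswith (pyId y).toList s.toList = true
    · simp [hsw, ih, List.append_assoc]
    · simp only [Bool.not_eq_true] at hsw
      by_cases hin : PySem.Chars.isIn s.toList (pyId y).toList = true
      · simp [hsw, hin, ih, List.append_assoc]
      · simp only [Bool.not_eq_true] at hin
        simp [hsw, hin, ih]

-- inserting a key-0 element goes right before the key-1 block
theorem insertBy_zero {α : Type} (before : α → α → Bool) (x : α) (P C : List α)
    (hP : ∀ p ∈ P, before x p = false) (hC : ∀ c ∈ C, before x c = true) :
    PySem.List.insertBy before x (P ++ C) = P ++ x :: C := by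
  induction P with
  | nil =>
    cases C with
    | nil => simp [PySem.List.insertBy]
    | cons c t => simp [PySem.List.insertBy, hC c (by simp)]
  | cons p t ih =>
    simp only [List.cons_append, PySem.List.insertBy, hP p (by simp)]
    simp only [Bool.false_eq_true, if_false]
    rw [ih (fun q hq => hP q (by simp [hq])) ]

-- the stable insertion-sort fold on a 0/1 key is the two-block partition
theorem foldl_insertBy_partition (key : List (String × String) → Int)
    (hkey : ∀ i, key i = 0 ∨ key i = 1)
    (ys P C : List (List (String × String)))
    (hP : ∀ p ∈ P, key p = 0) (hC : ∀ c ∈ C, key c = 1) :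
    ys.foldl (fun acc x => PySem.List.insertBy (fun a b => decide (key a < key b)) x acc) (P ++ C)
    = (P ++ ys.filter (fun y => key y == 0)) ++ (C ++ ys.filter (fun y => !(key y == 0))) := by
  induction ys generalizing P C with
  | nil => simp
  | cons y t ih =>
    simp only [PySem.Str.startswith_eq, PySem.Str.isIn_eq] at ih ⊢
    simp only [List.foldl_cons, List.filter_cons]
    by_cases h0 : key y = 0
    · rw [insertBy_zero _ y P C
        (fun p hp => by simp [hP p hp, h0])
        (fun c hc => by simp [hC c hc, h0])]
      have : P ++ y :: C = (P ++ [y]) ++ C := by simp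
      rw [this, ih (P ++ [y]) C
        (fun p hp => by rcases List.mem_append.mp hp with h | h
                        · exact hP p h
                        · simp at h; simpa [h] using h0) hC]
      simp [h0, List.append_assoc]
    · have h1 : key y = 1 := (hkey y).resolve_left h0
      rw [show P ++ C = (P ++ C) ++ [] by simp,
          insertBy_zero _ y (P ++ C) []
            (fun p hp => by rcases List.mem_append.mp hp with h | h
                            · simp [hP p h, h1]
                            · simp [hC p h, h1])
            (fun c hc => by simp at hc)]
      have : (P ++ C) ++ y :: [] = P ++ (C ++ [y]) := by simp
      rw [this, ih P (C ++ [y]) hP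
        (fun c hc => by rcases List.mem_append.mp hc with h | h
                        · exact hC c h
                        · simp at h; simpa [h] using h1)]
      simp [h0, List.append_assoc]

-- ===== VERDICT (by name: the statement is the Claim_ definition above) =====
theorem search_spec : Claim_equal_search := by
  intro s list _ _
  unfold Spec_search search search_alt
  by_cases hlen : PySem.Str.len s ≤ 0
  · have h0 : s.toList = [] := by
      rw [PySem.Str.len_eq] at hlen
      cases hl : s.toList with
      | nil => rfl
      | cons c t => rw [hl] at hlen; simp at hlen; omega
    have hs : s = "" := String.toList_eq_nil_iff.mp h0
    subst hs
    simp
  · simp only [hlen, if_false]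
    rw [searchA_loop]
    rw [PySem.List.sorted_eq_foldl_insertBy]
    rw [show ([] : List (List (String × String))) = [] ++ [] from rfl]
    rw [foldl_insertBy_partition _
      (fun i => by by_cases h : PySem.Str.startswith (pyId i) s = true <;> simp [h])
      _ [] [] (by simp) (by simp)]
    simp only [List.nil_append]
    congr 1
    · rw [List.filter_filter]
      apply List.filter_congr
      intro i _
      by_cases h : PySem.Chars.startswith (pyId i).toList s.toList = true
      · simp [h, sw_isIn s.toList (pyId i).toList h]
      · simp [h]
    · rw [List.filter_filter]
      apply List.filter_congr
      intro i _
      by_cases h : PySem.Chars.startswith (pyId i).toList s.toList = true <;> simp [h]
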